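-- pv_equiv track=rewrite | github.com/komal023/Coding-Test | test.py | check_count
-- ===== SOURCE A (Python) =====
-- def check_count(nums):
--
--     max1=max(nums)
--     min1=min(nums)
--     count = 0
--     for i in nums:
--         if i < max1 and i > min1:
--             count += 1
--     return count
-- ===== SOURCE B (Python) =====
-- def check_count(nums):
--     mx = max(nums)
--     mn = min(nums)
--     if mx == mn:
--         return 0
--     return len(nums) - nums.count(mn) - nums.count(mx)
-- ===== Notes on version B (the rewrite author's own statement) =====
-- stated objective: simpler
-- what changed: Replaces the per-element predicate loop with a complement count: total length minus occurrences of min and max (with a guard for the all-equal case).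
import Mathlib
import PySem

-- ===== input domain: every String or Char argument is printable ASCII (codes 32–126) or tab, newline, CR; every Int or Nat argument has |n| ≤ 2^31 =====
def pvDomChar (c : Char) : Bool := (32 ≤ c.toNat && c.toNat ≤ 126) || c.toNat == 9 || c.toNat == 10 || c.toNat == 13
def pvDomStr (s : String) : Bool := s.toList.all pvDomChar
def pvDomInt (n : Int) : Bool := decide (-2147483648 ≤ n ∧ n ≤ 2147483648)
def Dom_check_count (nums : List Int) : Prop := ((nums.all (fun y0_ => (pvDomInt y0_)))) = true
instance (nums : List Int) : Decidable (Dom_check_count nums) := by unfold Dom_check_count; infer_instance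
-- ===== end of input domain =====

-- B counts the strictly-interior elements as length minus occurrences of min and max (guarding the all-equal case), instead of A's per-element predicate loop; objective: simpler.


-- ===== PORT A =====
def check_count (nums : List Int) : Int :=
  match PySem.List.max? nums (fun y => y), PySem.List.min? nums (fun y => y) with
  | some max1, some min1 =>
      nums.foldl (fun count i => if i < max1 ∧ min1 < i then count + 1 else count) 0
  | _, _ => 0   -- unreachable under Pre_ (Python raises ValueError on [])

-- ===== PORT B =====
def check_count_alt (nums : List Int) : Int :=
  match PySem.List.max? nums (fun y => y) with
  | none => 0   -- unreachable under Pre_ (Python raises ValueError on [])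
  | some mx =>
    match PySem.List.min? nums (fun y => y) with
    | none => 0
    | some mn =>
      if mx = mn then 0
      else (nums.length : Int) - (PySem.List.count nums mn : Int) - (PySem.List.count nums mx : Int)

-- ===== PRECONDITION & SPEC =====
-- Pre_ excludes only the empty list, on which A (max of empty) raises ValueError.
def Pre_check_count (nums : List Int) : Prop := nums ≠ []
instance (nums : List Int) : Decidable (Pre_check_count nums) := by unfold Pre_check_count; infer_instance
def pvWitness_check_count : List Int := [1, 2, 3]
def Spec_check_count (nums : List Int) (out : Int) : Prop := out = check_count_alt nums
instance (nums : List Int) (out : Int) : Decidable (Spec_check_count nums out) := by unfold Spec_check_count; infer_instance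

-- ===== CLAIM (what is proved, stated in full; the proofs are below) =====
def Claim_equal_check_count : Prop := ∀ (nums : List Int), Dom_check_count nums → Pre_check_count nums → Spec_check_count nums (check_count nums)

-- ===== LEMMAS AND PROOFS =====

-- interior count = length - count mn - count mx, given bounds and mn < mx
theorem pv_interior_count (mn mx : Int) (h : mn < mx) :
    ∀ nums : List Int, (∀ i ∈ nums, mn ≤ i ∧ i ≤ mx) →
      (nums.countP (fun i => decide (i < mx ∧ mn < i)) : Int)
        = (nums.length : Int) - (nums.count mn : Int) - (nums.count mx : Int) := by
  intro nums
  induction nums with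
  | nil => simp
  | cons a t ih =>
    intro hb
    have hba := hb a (by simp)
    have ht := ih (fun i hi => hb i (by simp [hi]))
    simp only [List.countP_cons, List.count_cons, List.length_cons]
    by_cases h1 : a = mn <;> by_cases h2 : a = mx <;>
      simp_all <;> omega

-- all-equal case: nothing is strictly interior
theorem pv_interior_zero (m : Int) (nums : List Int) :
    nums.countP (fun i => decide (i < m ∧ m < i)) = 0 := by
  rw [List.countP_eq_zero]
  intro i _
  simp; omega

-- ===== VERDICT (by name: the statement is the Claim_ definition above) =====
theorem check_count_spec : Claim_equal_check_count := by
  intro nums _ hpre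
  unfold Spec_check_count check_count check_count_alt
  cases hmx : PySem.List.max? nums (fun y => y) with
  | none => rw [PySem.List.max?_eq_none_iff] at hmx
  | some mx =>
    cases hmn : PySem.List.min? nums (fun y => y) with
    | none => rw [PySem.List.min?_eq_none_iff] at hmn
    | some mn =>
      simp only
      have hmax := PySem.List.max?_isMax hmx
      have hmin := PySem.List.min?_isMin hmn
      have hmem := PySem.List.max?_mem hmx
      have hle : mn ≤ mx := hmin mx hmem
      rw [PySem.List.foldl_ite_add_one]
      by_cases heq : mx = mn
      · subst heq
        rw [pv_interior_zero]
        simp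
      · have hlt : mn < mx := lt_of_le_of_ne hle (fun e => heq e.symm)
        rw [if_neg heq]
        have := pv_interior_count mn mx hlt nums (fun i hi => ⟨hmin i hi, hmax i hi⟩)
        simpa [PySem.List.count_eq] using this
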